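-- pv_equiv track=rewrite | github.com/SashaNullptr/Google-Foo-Bar | solution_2b.py | find_nearest_fib
-- ===== SOURCE A (Python) =====
-- M = {0: 0, 1: 1}
--
-- def fibonacci_seq(n):
--     """
--     A relatively fast but precise version of the Fibonacci Sequence.
--
--     Note that naive recusrive implementations were causing the test harness to time-out
--     where as fast closed-form solutions such as:
--         phi = (math.sqrt(5) + 1) / 2
--         F_n = int(phi ** n / math.sqrt(5) + 0.5)
--
--     are prone to numerical errors for large n, which also showed up in the test harness.
--
--     This approach seems to strike a good balance between speed and precision.
--     """
--
--     if n < 0: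
--         raise IndexError( "Index is too small!" )
--     if n in M:
--         return M[n]
--     M[n] = fibonacci_seq(n - 1) + fibonacci_seq(n - 2)
--     return M[n]
--
-- def fibonacci_series( n ):
--     # It can be shown that sum( F[n] ) = F[n+2] - 1
--     return fibonacci_seq( n + 2 ) - 1
--
-- def fibonacci_series_offset( n ):
--     # We need to apply an offset to take into account that the 0'th minion gets
--     # 1 LAMB instead of 0.
--     return fibonacci_series( n + 1 )
--
-- def find_nearest_fib( max_value ):
--     """
--     Find the number of minions that could be paid out for a given number of LAMBs
--     using the "Least Generous" ( Fibonacci Sum ) rule.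
--     """
--
--     counter = 0
--
--     while True:
--
--         current_lambds = fibonacci_series_offset( counter )
--
--         if current_lambds < max_value:
--             counter += 1
--             continue
--
--         if current_lambds > max_value:
--             return counter - 1
--         elif current_lambds == max_value:
--             return counter
-- ===== SOURCE B (Python) =====
-- def find_nearest_fib(max_value):
--     """
--     Find the number of minions that could be paid out for a given number of LAMBs
--     using the "Least Generous" ( Fibonacci Sum ) rule.
--
--     Iterative version: keep a two-variable Fibonacci window and a running
--     accumulator equal to the current series-offset value (1, 2, 4, 7, 12, ...),
--     instead of memoized recursion plus the F[n+2]-1 identity.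
--     """
--     counter = 0
--     value = 1   # series-offset value at counter = 0
--     f, g = 1, 2  # f = next Fibonacci increment, g = the one after
--     while value < max_value:
--         value += f
--         f, g = g, f + g
--         counter += 1
--     return counter if value == max_value else counter - 1
-- ===== Notes on version B (the rewrite author's own statement) =====
-- stated objective: alternative
-- what changed: Replaces the memoized recursive fibonacci_seq plus the closed series identity (recomputed from the memo each loop round) with a single iterative loop that maintains a two-variable Fibonacci window and a running accumulator equal to the current series-offset value.
import Mathlib
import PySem

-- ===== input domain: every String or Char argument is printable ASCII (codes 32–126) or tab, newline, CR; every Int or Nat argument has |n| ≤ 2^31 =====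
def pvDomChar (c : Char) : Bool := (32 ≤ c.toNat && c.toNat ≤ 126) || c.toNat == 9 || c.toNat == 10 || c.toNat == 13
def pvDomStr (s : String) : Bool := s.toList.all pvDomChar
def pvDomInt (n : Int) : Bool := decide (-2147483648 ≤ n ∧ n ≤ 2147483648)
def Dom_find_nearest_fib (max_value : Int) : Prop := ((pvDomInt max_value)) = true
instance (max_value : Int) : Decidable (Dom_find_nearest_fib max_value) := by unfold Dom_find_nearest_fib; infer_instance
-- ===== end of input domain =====

-- B replaces A's memoized recursive Fibonacci + F[n+2]-1 identity by one iterative loop with a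
-- two-variable Fibonacci window and a running accumulator (objective: alternative; O(1) state, no dict).
-- A mutates the module-global memo M; that side effect is not observable through the return value.

-- ===== PORT A =====
-- fibonacci_seq with the memo dict M threaded through; `none` = the IndexError for n < 0
-- (never reached from find_nearest_fib, whose arguments to it are ≥ 3).
def fibonacci_seq (M : PySem.Dict Int Int) (n : Int) : Option (PySem.Dict Int Int × Int) :=
  if _h : n < 0 then none
  else
    match PySem.Dict.get? M n with
    | some v => some (M, v)
    | none =>
      match fibonacci_seq M (n - 1) with
      | none => none
      | some (M1, a) =>
        match fibonacci_seq M1 (n - 2) with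
        | none => none
        | some (M2, b) => some (PySem.Dict.insert M2 n (a + b), a + b)
termination_by (n + 1).toNat
decreasing_by all_goals omega

def fibonacci_series (M : PySem.Dict Int Int) (n : Int) : Option (PySem.Dict Int Int × Int) :=
  match fibonacci_seq M (n + 2) with
  | none => none
  | some (M', v) => some (M', v - 1)

def fibonacci_series_offset (M : PySem.Dict Int Int) (n : Int) : Option (PySem.Dict Int Int × Int) :=
  fibonacci_series M (n + 1)

-- the `while True` loop of A; fuel only makes it total in Lean (never exhausted on the
-- inputs the claim covers — the loop runs at most max_value iterations)
def findLoopA (fuel : Nat) (M : PySem.Dict Int Int) (max_value counter : Int) : Int :=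
  match fuel with
  | 0 => counter - 1
  | fuel + 1 =>
    match fibonacci_series_offset M counter with
    | none => counter - 1   -- unreachable: counter ≥ 0
    | some (M', current_lambds) =>
      if current_lambds < max_value then findLoopA fuel M' max_value (counter + 1)
      else if current_lambds > max_value then counter - 1
      else counter

def find_nearest_fib (max_value : Int) : Int :=
  findLoopA (max_value.toNat + 1)
    (PySem.Dict.insert (PySem.Dict.insert PySem.Dict.empty 0 0) 1 1) max_value 0

-- ===== PORT B =====
-- B's while loop; same fuel-for-totality device, same (unreachable) exhaustion default.
def findLoopB (fuel : Nat) (max_value counter value f g : Int) : Int :=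
  match fuel with
  | 0 => counter - 1
  | fuel + 1 =>
    if value < max_value then findLoopB fuel max_value (counter + 1) (value + f) g (f + g)
    else if value = max_value then counter else counter - 1

def find_nearest_fib_alt (max_value : Int) : Int :=
  findLoopB (max_value.toNat + 1) max_value 0 1 1 2

-- ===== PRECONDITION & SPEC =====
def Spec_find_nearest_fib (max_value : Int) (out : Int) : Prop := out = find_nearest_fib_alt max_value
instance (max_value : Int) (out : Int) : Decidable (Spec_find_nearest_fib max_value out) := by unfold Spec_find_nearest_fib; infer_instance

-- ===== CLAIM (what is proved, stated in full; the proofs are below) =====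
def Claim_equal_find_nearest_fib : Prop := ∀ (max_value : Int), Dom_find_nearest_fib max_value → Spec_find_nearest_fib max_value (find_nearest_fib max_value)

-- ===== LEMMAS AND PROOFS =====

-- the mathematical Fibonacci sequence (proof-only helper)
def fibZ : Nat → Int
  | 0 => 0
  | 1 => 1
  | n + 2 => fibZ (n + 1) + fibZ n

-- invariant on the threaded memo: every stored entry is correct and the two base entries are present
def MemoOK (M : PySem.Dict Int Int) : Prop :=
  (∀ k v, PySem.Dict.get? M k = some v → 0 ≤ k ∧ v = fibZ k.toNat) ∧
  PySem.Dict.get? M 0 = some 0 ∧ PySem.Dict.get? M 1 = some 1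

lemma memoOK_init :
    MemoOK (PySem.Dict.insert (PySem.Dict.insert PySem.Dict.empty 0 0) 1 1) := by
  refine ⟨?_, ?_, ?_⟩
  · intro k v h
    rcases eq_or_ne k 1 with rfl | h1
    · simp [PySem.Dict.get?_insert_self] at h; simp [← h, fibZ]
    · rw [PySem.Dict.get?_insert_of_ne _ _ h1] at h
      rcases eq_or_ne k 0 with rfl | h0
      · simp [PySem.Dict.get?_insert_self] at h; simp [← h, fibZ]
      · rw [PySem.Dict.get?_insert_of_ne _ _ h0] at h
        simp [PySem.Dict.get?_empty] at h
  · rw [PySem.Dict.get?_insert_of_ne _ _ (by norm_num), PySem.Dict.get?_insert_self]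
  · rw [PySem.Dict.get?_insert_self]

lemma fibZ_add_two (m : Nat) : fibZ (m + 2) = fibZ (m + 1) + fibZ m := rfl

lemma fibonacci_seq_ok : ∀ (k : Nat) (n : Int), n.toNat ≤ k → 0 ≤ n →
    ∀ M, MemoOK M →
      ∃ M', fibonacci_seq M n = some (M', fibZ n.toNat) ∧ MemoOK M' := by
  intro k
  induction k with
  | zero =>
    intro n hk hn M hM
    have hn0 : n = 0 := by omega
    subst hn0
    refine ⟨M, ?_, hM⟩
    rw [fibonacci_seq]
    rw [dif_neg (by omega : ¬ (0:Int) < 0), hM.2.1]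
    rfl
  | succ k ih =>
    intro n hk hn M hM
    rw [fibonacci_seq]
    rw [dif_neg (by omega : ¬ n < 0)]
    rcases hget : PySem.Dict.get? M n with _ | v
    · -- not memoized: n ∉ M, so n ≥ 2 (0 and 1 are always present)
      have h0 : n ≠ 0 := by rintro rfl; rw [hM.2.1] at hget; simp at hget
      have h1 : n ≠ 1 := by rintro rfl; rw [hM.2.2] at hget; simp at hget
      have hn2 : 2 ≤ n := by omega
      obtain ⟨M1, e1, hM1⟩ := ih (n - 1) (by omega) (by omega) M hM
      obtain ⟨M2, e2, hM2⟩ := ih (n - 2) (by omega) (by omega) M1 hM1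
      have hadd : fibZ (n - 1).toNat + fibZ (n - 2).toNat = fibZ n.toNat := by
        have h := fibZ_add_two (n.toNat - 2)
        have h1' : (n - 1).toNat = n.toNat - 2 + 1 := by omega
        have h2' : (n - 2).toNat = n.toNat - 2 := by omega
        have hm : n.toNat - 2 + 2 = n.toNat := by omega
        rw [hm] at h
        rw [h1', h2', h]
      refine ⟨PySem.Dict.insert M2 n (fibZ n.toNat), ?_, ?_⟩
      · rw [e1]
        dsimp only
        rw [e2]
        dsimp only
        rw [hadd]
      · refine ⟨?_, ?_, ?_⟩
        · intro a b hab
          rcases eq_or_ne a n with rfl | hne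
          · rw [PySem.Dict.get?_insert_self] at hab
            exact ⟨by omega, by cases hab; rfl⟩
          · rw [PySem.Dict.get?_insert_of_ne _ _ hne] at hab
            exact hM2.1 a b hab
        · rw [PySem.Dict.get?_insert_of_ne _ _ (by omega : (0:Int) ≠ n)]; exact hM2.2.1
        · rw [PySem.Dict.get?_insert_of_ne _ _ (by omega : (1:Int) ≠ n)]; exact hM2.2.2
    · exact ⟨M, by rw [(hM.1 n v hget).2], hM⟩

lemma loop_agree (fuel : Nat) :
    ∀ (max_value counter : Int) (M : PySem.Dict Int Int), 0 ≤ counter → MemoOK M →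
      findLoopA fuel M max_value counter
        = findLoopB fuel max_value counter
            (fibZ (counter + 3).toNat - 1) (fibZ (counter + 2).toNat) (fibZ (counter + 3).toNat) := by
  induction fuel with
  | zero => intro mv c M _ _; rfl
  | succ fuel ih =>
    intro mv c M hc hM
    obtain ⟨M', e, hM'⟩ := fibonacci_seq_ok (c + 3).toNat (c + 3) le_rfl (by omega) M hM
    show findLoopA (fuel + 1) M mv c = findLoopB (fuel + 1) mv c _ _ _
    rw [findLoopA, findLoopB]
    unfold fibonacci_series_offset fibonacci_series
    have h13 : c + 1 + 2 = c + 3 := by ring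
    rw [h13, e]
    dsimp only
    have hstep : fibZ (c + 3).toNat - 1 + fibZ (c + 2).toNat = fibZ (c + 1 + 3).toNat - 1 ∧
        fibZ (c + 2).toNat + fibZ (c + 3).toNat = fibZ (c + 1 + 3).toNat := by
      have h2 : (c + 2).toNat = c.toNat + 2 := by omega
      have h3 : (c + 3).toNat = c.toNat + 3 := by omega
      have h4 : (c + 1 + 3).toNat = c.toNat + 2 + 2 := by omega
      have h := fibZ_add_two (c.toNat + 2)
      rw [show c.toNat + 2 + 1 = c.toNat + 3 from by omega] at h
      rw [h2, h3, h4]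
      constructor <;> linarith [h]
    split_ifs with h1 h2 h3
    · rw [ih mv (c + 1) M' (by omega) hM', hstep.1, hstep.2, h13]
    · omega
    · rfl
    · rfl
    · omega

-- ===== VERDICT (by name: the statement is the Claim_ definition above) =====
theorem find_nearest_fib_spec : Claim_equal_find_nearest_fib := by
  intro mv _
  show find_nearest_fib mv = find_nearest_fib_alt mv
  unfold find_nearest_fib find_nearest_fib_alt
  rw [loop_agree _ _ 0 _ le_rfl memoOK_init]
  rw [show fibZ ((0:Int) + 3).toNat = 2 from rfl, show fibZ ((0:Int) + 2).toNat = 1 from rfl]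
  norm_num
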